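-- pv_equiv track=rewrite | github.com/XinyiYS/Algorithm-Practices | leetcode/Array computations easy.py | removeBfromA
-- ===== SOURCE A (Python) =====
-- from collections import Counter
--
-- def removeBfromA(A, B):
-- 	counterA = Counter(A)
-- 	for b in B:
-- 		if b in counterA:
-- 			counterA[b] -= 1
-- 			if counterA[b] == 0 : counterA.pop(b)
--
-- 	res = []
-- 	for a in A:
-- 		if a in counterA:
-- 			res += [a]
-- 			counterA[a] -= 1
-- 			if counterA[a] == 0 : counterA.pop(a)
--
-- 	return res
-- ===== SOURCE B (Python) =====
-- from collections import Counter
--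
-- def removeBfromA(A, B):
--     # One reversed pass over A with a consumed removal budget drawn from Counter(B):
--     # dropping from the right keeps exactly the earliest occurrences.
--     budget = Counter(B)
--     kept = []
--     for a in reversed(A):
--         if budget[a] > 0:
--             budget[a] -= 1
--         else:
--             kept.append(a)
--     kept.reverse()
--     return kept
-- ===== Notes on version B (the rewrite author's own statement) =====
-- stated objective: alternative
-- what changed: Replaces A's two-phase scheme (build Counter(A), consume it against B, then re-scan A against the remaining counts) by a single reversed pass over A that drops elements against a removal budget Counter(B) and reverses the kept list.
import Mathlib
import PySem

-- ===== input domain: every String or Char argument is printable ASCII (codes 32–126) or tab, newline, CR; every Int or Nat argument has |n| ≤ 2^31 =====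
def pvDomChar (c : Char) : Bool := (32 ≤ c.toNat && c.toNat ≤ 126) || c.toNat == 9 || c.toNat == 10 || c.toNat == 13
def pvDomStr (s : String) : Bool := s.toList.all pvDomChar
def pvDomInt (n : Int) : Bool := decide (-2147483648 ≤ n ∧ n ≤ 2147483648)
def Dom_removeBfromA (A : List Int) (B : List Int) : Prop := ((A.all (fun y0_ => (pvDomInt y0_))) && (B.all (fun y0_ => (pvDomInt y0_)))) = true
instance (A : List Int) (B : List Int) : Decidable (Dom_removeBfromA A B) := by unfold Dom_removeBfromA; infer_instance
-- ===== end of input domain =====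

-- B replaces A's two forward passes (consume Counter(A) against B, then re-scan A)
-- by one reversed pass over A dropping against a budget Counter(B); same cost, alternative decomposition.

-- ===== PORT A =====
-- loop body of A's first loop: 'if b in counterA: counterA[b] -= 1; if counterA[b] == 0: counterA.pop(b)'
def removeBfromA_step1 (d : PySem.Dict Int Int) (b : Int) : PySem.Dict Int Int :=
  if d.contains b then
    let d' := d.insert b (d.getD b 0 - 1)
    if d'.getD b 0 = 0 then d'.erase b else d'
  else d

-- loop body of A's second loop: 'if a in counterA: res += [a]; counterA[a] -= 1; if counterA[a] == 0: counterA.pop(a)'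
def removeBfromA_step2 (st : PySem.Dict Int Int × List Int) (a : Int) : PySem.Dict Int Int × List Int :=
  if st.1.contains a then
    let res := st.2 ++ [a]
    let d' := st.1.insert a (st.1.getD a 0 - 1)
    (if d'.getD a 0 = 0 then d'.erase a else d', res)
  else st

def removeBfromA (A : List Int) (B : List Int) : List Int :=
  (A.foldl removeBfromA_step2 (B.foldl removeBfromA_step1 (PySem.Dict.counter A), [])).2

-- ===== PORT B =====
-- loop body of B: 'if budget[a] > 0: budget[a] -= 1 else: kept.append(a)'
def removeBfromA_altStep (st : PySem.Dict Int Int × List Int) (a : Int) : PySem.Dict Int Int × List Int :=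
  if 0 < st.1.getD a 0 then (st.1.insert a (st.1.getD a 0 - 1), st.2)
  else (st.1, st.2 ++ [a])

def removeBfromA_alt (A : List Int) (B : List Int) : List Int :=
  ((A.reverse.foldl removeBfromA_altStep (PySem.Dict.counter B, [])).2).reverse

-- ===== PRECONDITION & SPEC =====
def Spec_removeBfromA (A : List Int) (B : List Int) (out : List Int) : Prop := out = removeBfromA_alt A B
instance (A : List Int) (B : List Int) (out : List Int) : Decidable (Spec_removeBfromA A B out) := by unfold Spec_removeBfromA; infer_instance

-- ===== CLAIM (what is proved, stated in full; the proofs are below) =====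
def Claim_equal_removeBfromA : Prop := ∀ (A : List Int) (B : List Int), Dom_removeBfromA A B → Spec_removeBfromA A B (removeBfromA A B)

-- ===== LEMMAS AND PROOFS =====

-- integer-valued occurrence count
def pvCnt (l : List Int) (x : Int) : Int := (l.count x : Int)

-- decrement a budget function at one point
def pvDec (n : Int → Int) (a : Int) : Int → Int := fun x => if x = a then n a - 1 else n x

-- keep the first (n x) occurrences of each x
def pvTake : List Int → (Int → Int) → List Int
  | [], _ => []
  | a :: t, n => if 0 < n a then a :: pvTake t (pvDec n a) else pvTake t n

-- drop the first (n x) occurrences of each x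
def pvDrop : List Int → (Int → Int) → List Int
  | [], _ => []
  | a :: t, n => if 0 < n a then pvDrop t (pvDec n a) else a :: pvDrop t n

-- all stored counter values are positive (Python Counter after popping zeros)
def pvInv (d : PySem.Dict Int Int) : Prop := ∀ x v, d.get? x = some v → 0 < v

lemma pvCnt_nonneg (l : List Int) (x : Int) : 0 ≤ pvCnt l x := by
  simp [pvCnt]

lemma pvCnt_cons_self (a : Int) (t : List Int) : pvCnt (a :: t) a = pvCnt t a + 1 := by
  simp [pvCnt]

lemma pvCnt_cons_ne (a : Int) (t : List Int) (x : Int) (h : a ≠ x) :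
    pvCnt (a :: t) x = pvCnt t x := by
  simp [pvCnt, h]

lemma pvCnt_le_cons (a : Int) (t : List Int) (x : Int) : pvCnt t x ≤ pvCnt (a :: t) x := by
  by_cases h : a = x
  · subst h; rw [pvCnt_cons_self]; omega
  · rw [pvCnt_cons_ne a t x h]

lemma pvCnt_reverse (l : List Int) (x : Int) : pvCnt l.reverse x = pvCnt l x := by
  simp [pvCnt]

lemma pvDec_self (n : Int → Int) (a : Int) : pvDec n a a = n a - 1 := by
  simp [pvDec]

lemma pvDec_ne (n : Int → Int) (a x : Int) (h : x ≠ a) : pvDec n a x = n x := by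
  simp [pvDec, h]

lemma pvDict_get?_erase_self (d : PySem.Dict Int Int) (k : Int) :
    (d.erase k).get? k = none := by
  simp [PySem.Dict.erase, PySem.Dict.get?, List.find?_eq_none]

lemma pvDict_get?_erase_of_ne (d : PySem.Dict Int Int) (k x : Int) (h : x ≠ k) :
    (d.erase k).get? x = d.get? x := by
  obtain ⟨items⟩ := d
  simp only [PySem.Dict.erase, PySem.Dict.get?]
  induction items with
  | nil => rfl
  | cons p t ih =>
    by_cases hpx : p.1 = x
    · simp [hpx, h]
    · by_cases hpk : p.1 = k
      · simpa [List.filter_cons, List.find?_cons, hpx, hpk, Ne.symm h] using ih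
      · simpa [List.filter_cons, List.find?_cons, hpx, hpk, Ne.symm h] using ih

lemma pvInv_getD_nonneg (d : PySem.Dict Int Int) (h : pvInv d) (x : Int) :
    0 ≤ d.getD x 0 := by
  rw [PySem.Dict.getD_eq_get?_getD]
  cases hg : d.get? x with
  | none => simp
  | some v => simpa using le_of_lt (h x v hg)

lemma pvInv_pos_of_contains (d : PySem.Dict Int Int) (h : pvInv d) (x : Int)
    (hc : d.contains x = true) : 0 < d.getD x 0 := by
  rw [PySem.Dict.contains_eq_isSome_get?] at hc
  cases hg : d.get? x with
  | none => simp [hg] at hc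
  | some v =>
    rw [PySem.Dict.getD_eq_get?_getD, hg]
    exact h x v hg

lemma step1_getD (d : PySem.Dict Int Int) (b x : Int) (h : pvInv d) :
    (removeBfromA_step1 d b).getD x 0
      = if x = b then max (d.getD b 0 - 1) 0 else d.getD x 0 := by
  unfold removeBfromA_step1
  by_cases hc : d.contains b = true
  · have hv : 0 < d.getD b 0 := pvInv_pos_of_contains d h b hc
    rw [if_pos hc]
    have h1 : (d.insert b (d.getD b 0 - 1)).getD b 0 = d.getD b 0 - 1 :=
      PySem.Dict.getD_insert_self d b _ 0
    by_cases hz : d.getD b 0 - 1 = 0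
    · rw [if_pos (h1.trans hz)]
      by_cases hx : x = b
      · subst hx
        rw [if_pos rfl, PySem.Dict.getD_eq_get?_getD, pvDict_get?_erase_self, hz]
        simp
      · rw [if_neg hx, PySem.Dict.getD_eq_get?_getD, pvDict_get?_erase_of_ne _ _ _ hx,
            PySem.Dict.get?_insert_of_ne d _ hx, ← PySem.Dict.getD_eq_get?_getD]
    · rw [if_neg (fun hh => hz (h1.symm.trans hh))]
      by_cases hx : x = b
      · subst hx
        rw [if_pos rfl, h1]
        omega
      · rw [if_neg hx, PySem.Dict.getD_insert_of_ne d _ _ hx]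
  · rw [if_neg hc]
    have hcf : d.contains b = false := by simpa using hc
    have h0 : d.getD b 0 = 0 := PySem.Dict.getD_of_not_contains d 0 hcf
    by_cases hx : x = b
    · subst hx
      rw [if_pos rfl, h0]
      simp
    · rw [if_neg hx]

lemma step1_inv (d : PySem.Dict Int Int) (b : Int) (h : pvInv d) :
    pvInv (removeBfromA_step1 d b) := by
  intro x v hg
  unfold removeBfromA_step1 at hg
  by_cases hc : d.contains b = true
  · rw [if_pos hc] at hg
    have hv : 0 < d.getD b 0 := pvInv_pos_of_contains d h b hc
    have h1 : (d.insert b (d.getD b 0 - 1)).getD b 0 = d.getD b 0 - 1 :=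
      PySem.Dict.getD_insert_self d b _ 0
    by_cases hz : d.getD b 0 - 1 = 0
    · rw [if_pos (h1.trans hz)] at hg
      by_cases hx : x = b
      · subst hx; rw [pvDict_get?_erase_self] at hg; cases hg
      · rw [pvDict_get?_erase_of_ne _ _ _ hx,
            PySem.Dict.get?_insert_of_ne d _ hx] at hg
        exact h x v hg
    · rw [if_neg (fun hh => hz (h1.symm.trans hh))] at hg
      by_cases hx : x = b
      · subst hx
        rw [PySem.Dict.get?_insert_self] at hg
        injection hg with hg'
        omega
      · rw [PySem.Dict.get?_insert_of_ne d _ hx] at hg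
        exact h x v hg
  · rw [if_neg hc] at hg
    exact h x v hg

lemma foldl1_inv (B : List Int) : ∀ d, pvInv d → pvInv (B.foldl removeBfromA_step1 d) := by
  induction B with
  | nil => intro d h; exact h
  | cons b t ih => intro d h; exact ih _ (step1_inv d b h)

lemma foldl1_getD (B : List Int) : ∀ d, pvInv d → ∀ x,
    (B.foldl removeBfromA_step1 d).getD x 0 = max (d.getD x 0 - pvCnt B x) 0 := by
  induction B with
  | nil =>
    intro d h x
    have := pvInv_getD_nonneg d h x
    simp only [List.foldl_nil, pvCnt, List.count_nil, Nat.cast_zero]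
    omega
  | cons b t ih =>
    intro d h x
    rw [List.foldl_cons, ih _ (step1_inv d b h) x, step1_getD d b x h]
    have hdb := pvInv_getD_nonneg d h b
    have hct := pvCnt_nonneg t x
    by_cases hx : x = b
    · subst hx
      rw [if_pos rfl, pvCnt_cons_self]
      omega
    · rw [if_neg hx, pvCnt_cons_ne b t x (fun hh => hx hh.symm)]

lemma step2_eq (st : PySem.Dict Int Int × List Int) (a : Int) :
    removeBfromA_step2 st a
      = if st.1.contains a then (removeBfromA_step1 st.1 a, st.2 ++ [a]) else st := by
  unfold removeBfromA_step2 removeBfromA_step1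
  by_cases h : st.1.contains a = true <;> simp [h]

lemma pvTake_ext (l : List Int) : ∀ n n' : Int → Int,
    (∀ x, n x = n' x ∨ (pvCnt l x ≤ n x ∧ pvCnt l x ≤ n' x)) →
    pvTake l n = pvTake l n' := by
  induction l with
  | nil => intro n n' _; rfl
  | cons a t ih =>
    intro n n' h
    have hct : ∀ x, pvCnt t x ≤ pvCnt (a :: t) x := pvCnt_le_cons a t
    have hca : pvCnt (a :: t) a = pvCnt t a + 1 := pvCnt_cons_self a t
    rcases h a with ha | ⟨ha1, ha2⟩
    · by_cases hp : 0 < n a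
      · have hp' : 0 < n' a := ha ▸ hp
        simp only [pvTake, if_pos hp, if_pos hp']
        congr 1
        apply ih
        intro x
        rcases h x with hx | ⟨hx1, hx2⟩
        · left; simp [pvDec, ha, hx]
        · right
          by_cases hxa : x = a
          · subst hxa
            rw [pvDec_self, pvDec_self]
            constructor <;> omega
          · rw [pvDec_ne n a x hxa, pvDec_ne n' a x hxa]
            exact ⟨le_trans (hct x) hx1, le_trans (hct x) hx2⟩
      · have hp' : ¬ 0 < n' a := ha ▸ hp
        simp only [pvTake, if_neg hp, if_neg hp']
        apply ih
        intro x
        rcases h x with hx | ⟨hx1, hx2⟩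
        · left; exact hx
        · right; exact ⟨le_trans (hct x) hx1, le_trans (hct x) hx2⟩
    · have hc0 : 0 ≤ pvCnt t a := pvCnt_nonneg t a
      have hp : 0 < n a := by omega
      have hp' : 0 < n' a := by omega
      simp only [pvTake, if_pos hp, if_pos hp']
      congr 1
      apply ih
      intro x
      by_cases hx : x = a
      · subst hx; right; rw [pvDec_self, pvDec_self]; constructor <;> omega
      · rcases h x with h' | ⟨h1, h2⟩
        · left; rw [pvDec_ne n a x hx, pvDec_ne n' a x hx]; exact h'
        · right
          rw [pvDec_ne n a x hx, pvDec_ne n' a x hx]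
          exact ⟨le_trans (hct x) h1, le_trans (hct x) h2⟩

lemma pvDrop_congr (l : List Int) : ∀ n n' : Int → Int, (∀ x, n x = n' x) →
    pvDrop l n = pvDrop l n' := by
  induction l with
  | nil => intro n n' _; rfl
  | cons a t ih =>
    intro n n' h
    simp only [pvDrop, h a]
    split
    · exact ih _ _ (fun x => by simp [pvDec, h])
    · rw [ih _ _ h]

lemma foldl2 (A : List Int) : ∀ d acc, pvInv d →
    (A.foldl removeBfromA_step2 (d, acc)).2 = acc ++ pvTake A (fun x => d.getD x 0) := by
  induction A with
  | nil => intro d acc _; simp [pvTake]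
  | cons a t ih =>
    intro d acc h
    rw [List.foldl_cons, step2_eq]
    by_cases hc : d.contains a = true
    · rw [if_pos hc]
      rw [ih _ _ (step1_inv d a h)]
      have hp : 0 < d.getD a 0 := pvInv_pos_of_contains d h a hc
      have ht : pvTake t (fun x => (removeBfromA_step1 d a).getD x 0)
          = pvTake t (pvDec (fun x => d.getD x 0) a) := by
        apply pvTake_ext
        intro x
        left
        rw [step1_getD d a x h]
        by_cases hx : x = a
        · subst hx
          rw [if_pos rfl, pvDec_self]
          omega
        · rw [if_neg hx, pvDec_ne _ a x hx]
      rw [ht]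
      have hu : pvTake (a :: t) (fun x => d.getD x 0)
          = a :: pvTake t (pvDec (fun x => d.getD x 0) a) := by
        simp [pvTake, hp]
      rw [hu]
      simp
    · rw [if_neg hc]
      have hcf : d.contains a = false := by simpa using hc
      have h0 : d.getD a 0 = 0 := PySem.Dict.getD_of_not_contains d 0 hcf
      rw [ih _ _ h]
      have hu : pvTake (a :: t) (fun x => d.getD x 0) = pvTake t (fun x => d.getD x 0) := by
        simp [pvTake, h0]
      rw [hu]

lemma pvInv_counter (A : List Int) : pvInv (PySem.Dict.counter A) := by
  intro x v hg
  have hm : (x, v) ∈ (PySem.Dict.counter A).items :=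
    PySem.Dict.mem_items_of_get?_eq_some (PySem.Dict.counter A) hg
  rw [PySem.Dict.items_counter] at hm
  simp only [List.mem_map] at hm
  obtain ⟨k, hk, hkv⟩ := hm
  rw [Prod.mk.injEq] at hkv
  obtain ⟨hx, hv⟩ := hkv
  have hmem : k ∈ A := (PySem.Set.mem_ofList A k).mp hk
  have hpos : 0 < A.count k := List.count_pos_iff.mpr hmem
  omega

lemma removeBfromA_char (A B : List Int) :
    removeBfromA A B = pvTake A (fun x => max (pvCnt A x - pvCnt B x) 0) := by
  unfold removeBfromA
  rw [foldl2 _ _ _ (foldl1_inv B _ (pvInv_counter A))]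
  rw [List.nil_append]
  apply pvTake_ext
  intro x
  left
  rw [foldl1_getD B _ (pvInv_counter A) x, PySem.Dict.getD_counter]
  rfl

lemma foldlAlt (L : List Int) : ∀ d acc,
    (L.foldl removeBfromA_altStep (d, acc)).2 = acc ++ pvDrop L (fun x => d.getD x 0) := by
  induction L with
  | nil => intro d acc; simp [pvDrop]
  | cons a t ih =>
    intro d acc
    by_cases hp : 0 < d.getD a 0
    · simp only [List.foldl_cons, removeBfromA_altStep, hp, if_true]
      rw [ih]
      have hd : pvDrop t (fun x => (d.insert a (d.getD a 0 - 1)).getD x 0)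
          = pvDrop t (pvDec (fun x => d.getD x 0) a) := by
        apply pvDrop_congr
        intro x
        rw [PySem.Dict.getD_insert]
        simp [pvDec]
      rw [hd]
      have hu : pvDrop (a :: t) (fun x => d.getD x 0)
          = pvDrop t (pvDec (fun x => d.getD x 0) a) := by
        simp [pvDrop, hp]
      rw [hu]
    · simp only [List.foldl_cons, removeBfromA_altStep, hp, if_false]
      rw [ih]
      have hu : pvDrop (a :: t) (fun x => d.getD x 0)
          = a :: pvDrop t (fun x => d.getD x 0) := by
        simp [pvDrop, hp]
      rw [hu]
      simp

lemma pvTake_append (a : Int) (xs : List Int) : ∀ n : Int → Int, (∀ x, 0 ≤ n x) →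
    pvTake (xs ++ [a]) n = pvTake xs n ++ (if pvCnt xs a < n a then [a] else []) := by
  induction xs with
  | nil =>
    intro n _
    simp only [List.nil_append, pvTake]
    by_cases h : 0 < n a
    · rw [if_pos h, if_pos (by simpa [pvCnt] using h)]
    · rw [if_neg h, if_neg (by simpa [pvCnt] using h)]
  | cons x t ih =>
    intro n hn
    by_cases hx : 0 < n x
    · have hdec : ∀ y, 0 ≤ pvDec n x y := by
        intro y; simp only [pvDec]; split
        · omega
        · exact hn y
      have hcond : pvCnt t a < pvDec n x a ↔ pvCnt (x :: t) a < n a := by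
        by_cases hxa : a = x
        · subst hxa
          rw [pvDec_self, pvCnt_cons_self]
          omega
        · rw [pvDec_ne n x a hxa, pvCnt_cons_ne x t a (fun hh => hxa hh.symm)]
      simp only [List.cons_append, pvTake, if_pos hx]
      rw [ih (pvDec n x) hdec, if_congr hcond rfl rfl]
    · have hx0 : n x = 0 := le_antisymm (not_lt.mp hx) (hn x)
      have hcond : pvCnt t a < n a ↔ pvCnt (x :: t) a < n a := by
        by_cases hxa : x = a
        · subst hxa
          rw [pvCnt_cons_self]
          have := pvCnt_nonneg t x
          omega
        · rw [pvCnt_cons_ne x t a hxa]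
      simp only [List.cons_append, pvTake, if_neg hx]
      rw [ih n hn, if_congr hcond rfl rfl]

lemma pvDrop_rev (L : List Int) : ∀ n : Int → Int, (∀ x, 0 ≤ n x) →
    pvDrop L n = (pvTake L.reverse (fun x => max (pvCnt L x - n x) 0)).reverse := by
  induction L with
  | nil => intro n _; rfl
  | cons a t ih =>
    intro n hn
    have hg : ∀ x, 0 ≤ max (pvCnt (a :: t) x - n x) 0 := fun x => le_max_right _ _
    rw [List.reverse_cons, pvTake_append a t.reverse _ hg]
    have hca : pvCnt (a :: t) a = pvCnt t a + 1 := pvCnt_cons_self a t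
    by_cases hp : 0 < n a
    · have hcond : ¬ (pvCnt t.reverse a < max (pvCnt (a :: t) a - n a) 0) := by
        rw [pvCnt_reverse, hca]
        have := pvCnt_nonneg t a
        omega
      rw [if_neg hcond, List.append_nil]
      have hdec : ∀ y, 0 ≤ pvDec n a y := by
        intro y
        by_cases hy : y = a
        · subst hy; rw [pvDec_self]; omega
        · rw [pvDec_ne n a y hy]; exact hn y
      have hstep : pvDrop (a :: t) n = pvDrop t (pvDec n a) := by
        simp [pvDrop, hp]
      rw [hstep, ih (pvDec n a) hdec]
      congr 1
      apply pvTake_ext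
      intro x
      left
      by_cases hx : x = a
      · subst hx
        rw [pvDec_self, hca]
        omega
      · rw [pvDec_ne n a x hx, pvCnt_cons_ne a t x (fun hh => hx hh.symm)]
    · have hp0 : n a = 0 := le_antisymm (not_lt.mp hp) (hn a)
      have hcond : pvCnt t.reverse a < max (pvCnt (a :: t) a - n a) 0 := by
        rw [pvCnt_reverse, hca, hp0]
        have := pvCnt_nonneg t a
        omega
      rw [if_pos hcond, List.reverse_append]
      have hstep : pvDrop (a :: t) n = a :: pvDrop t n := by
        simp [pvDrop, hp]
      rw [hstep, ih n hn]
      simp only [List.reverse_cons, List.reverse_nil, List.nil_append, List.singleton_append]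
      congr 2
      apply pvTake_ext
      intro x
      by_cases hx : x = a
      · subst hx
        right
        rw [pvCnt_reverse, hca, hp0]
        have := pvCnt_nonneg t x
        constructor <;> omega
      · left
        rw [pvCnt_cons_ne a t x (fun hh => hx hh.symm)]

lemma removeBfromA_alt_char (A B : List Int) :
    removeBfromA_alt A B = pvTake A (fun x => max (pvCnt A x - pvCnt B x) 0) := by
  unfold removeBfromA_alt
  rw [foldlAlt, List.nil_append]
  have h1 : pvDrop A.reverse (fun x => (PySem.Dict.counter B).getD x 0)
      = pvDrop A.reverse (fun x => pvCnt B x) := by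
    apply pvDrop_congr
    intro x
    rw [PySem.Dict.getD_counter]
    rfl
  rw [h1, pvDrop_rev A.reverse (fun x => pvCnt B x) (pvCnt_nonneg B), List.reverse_reverse,
      List.reverse_reverse]
  apply pvTake_ext
  intro x
  left
  rw [pvCnt_reverse]

-- ===== VERDICT (by name: the statement is the Claim_ definition above) =====
theorem removeBfromA_spec : Claim_equal_removeBfromA := by
  intro A B _
  unfold Spec_removeBfromA
  rw [removeBfromA_char, removeBfromA_alt_char]
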